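-- pv_equiv track=rewrite | github.com/jajupmochi/graphkit-learn | gklearn/experiments/ged/stability/utils.py | mix_param_grids
-- ===== SOURCE A (Python) =====
-- def mix_param_grids(list_of_grids):
-- 	mixed_grids = []
-- 	not_finished = [True] * len(list_of_grids)
-- 	idx = 0
-- 	while sum(not_finished) > 0:
-- 		for g_idx, grid in enumerate(list_of_grids):
-- 			if idx < len(grid):
-- 				mixed_grids.append(grid[idx])
-- 			else:
-- 				not_finished[g_idx] = False
-- 		idx += 1
--
-- 	return mixed_grids
-- ===== SOURCE B (Python) =====
-- def mix_param_grids(list_of_grids):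
-- 	mixed_grids = []
-- 	stacks = [grid[::-1] for grid in list_of_grids if grid]
-- 	while stacks:
-- 		for s in stacks:
-- 			mixed_grids.append(s.pop())
-- 		stacks = [s for s in stacks if s]
-- 	return mixed_grids
-- ===== Notes on version B (the rewrite author's own statement) =====
-- stated objective: alternative
-- what changed: B drops the empty grids, reverses the rest into stacks, and round-robin pops one element from every live stack per round (the stack list shrinking as stacks empty), instead of A's global index counter with not_finished flags re-summed every round.
import Mathlib
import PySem

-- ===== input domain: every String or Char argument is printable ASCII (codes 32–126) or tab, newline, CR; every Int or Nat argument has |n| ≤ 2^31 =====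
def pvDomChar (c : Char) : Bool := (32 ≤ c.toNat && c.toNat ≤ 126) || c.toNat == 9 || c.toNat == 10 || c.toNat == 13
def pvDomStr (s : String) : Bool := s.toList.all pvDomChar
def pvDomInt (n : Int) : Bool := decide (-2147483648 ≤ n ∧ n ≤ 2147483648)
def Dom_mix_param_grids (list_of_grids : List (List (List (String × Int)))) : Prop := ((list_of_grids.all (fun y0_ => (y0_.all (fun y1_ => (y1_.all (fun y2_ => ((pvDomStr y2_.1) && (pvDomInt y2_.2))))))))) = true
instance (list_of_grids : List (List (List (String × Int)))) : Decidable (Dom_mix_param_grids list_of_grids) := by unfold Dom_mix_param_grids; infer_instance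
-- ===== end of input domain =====

-- B reverses each nonempty grid into a stack and round-robin pops one element from every
-- live stack per round, instead of A's index counter with not_finished flag bookkeeping
-- (objective: alternative).


-- ===== PORT A =====
-- fuel bound for the while loop (not part of the Python; the loop provably stops
-- after at most pvMaxLenA + 1 rounds, so this fuel is never exhausted)
def pvMaxLenA (grids : List (List (List (String × Int)))) : Nat :=
  grids.foldl (fun m g => max m g.length) 0

-- the while loop: state (mixed_grids, not_finished, idx); the for loop over
-- enumerate(list_of_grids) is the inner foldl.  idx only ever grows from 0, so it is a Nat;
-- grid[idx] is guarded by idx < len(grid), so getD is exact; enumerate indices are ≥ 0,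
-- so p.1.toNat is exact.
def pvLoopA (grids : List (List (List (String × Int)))) :
    Nat → List (List (String × Int)) → List Bool → Nat → List (List (String × Int))
  | 0, mixed, _, _ => mixed
  | fuel + 1, mixed, nf, idx =>
    if 0 < ((nf.map (fun b => if b then (1 : Int) else 0)).sum) then
      let st := (PySem.List.enumerate grids).foldl
        (fun (st : List (List (String × Int)) × List Bool) (p : Int × List (List (String × Int))) =>
          if idx < p.2.length then (st.1 ++ [p.2.getD idx []], st.2)
          else (st.1, st.2.set p.1.toNat false))
        (mixed, nf)
      pvLoopA grids fuel st.1 st.2 (idx + 1)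
    else mixed

def mix_param_grids (list_of_grids : List (List (List (String × Int)))) : List (List (String × Int)) :=
  pvLoopA list_of_grids (pvMaxLenA list_of_grids + 2) [] (List.replicate list_of_grids.length true) 0

-- ===== PORT B =====
-- fuel bound for B's while loop (not part of the Python; the loop provably stops after at
-- most pvMaxLenB rounds, so this fuel is never exhausted).  The loop state is (mixed_grids,
-- stks); the for loop popping s.pop() from every stack and the trailing comprehension
-- dropping emptied stks become the foldl/map/filter below.  grid[::-1] is List.reverse
-- (exact); s.pop() on a nonempty stack returns its last element (getLastD) and leaves
-- s.dropLast, exact here because every stack in the list is nonempty (emptied stks are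
-- filtered out at the end of each round, and the initial comprehension keeps only
-- nonempty grids).
def pvMaxLenB (grids : List (List (List (String × Int)))) : Nat :=
  (grids.map List.length).foldl max 0

def pvLoopB : Nat → List (List (String × Int)) → List (List (List (String × Int))) →
    List (List (String × Int))
  | 0, mixed, _ => mixed
  | fuel + 1, mixed, stks =>
    if stks.isEmpty then mixed
    else
      pvLoopB fuel
        (stks.foldl (fun m s => m ++ [s.getLastD []]) mixed)
        ((stks.map List.dropLast).filter (fun s => !s.isEmpty))

def mix_param_grids_alt (list_of_grids : List (List (List (String × Int)))) : List (List (String × Int)) :=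
  pvLoopB (pvMaxLenB list_of_grids + 1) []
    ((list_of_grids.filter (fun g => !g.isEmpty)).map List.reverse)

-- ===== PRECONDITION & SPEC =====
def Spec_mix_param_grids (list_of_grids : List (List (List (String × Int)))) (out : List (List (String × Int))) : Prop := out = mix_param_grids_alt list_of_grids
instance (list_of_grids : List (List (List (String × Int)))) (out : List (List (String × Int))) : Decidable (Spec_mix_param_grids list_of_grids out) := by unfold Spec_mix_param_grids; infer_instance

-- ===== CLAIM (what is proved, stated in full; the proofs are below) =====
def Claim_equal_mix_param_grids : Prop := ∀ (list_of_grids : List (List (List (String × Int)))), Dom_mix_param_grids list_of_grids → Spec_mix_param_grids list_of_grids (mix_param_grids list_of_grids)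

-- ===== LEMMAS AND PROOFS =====

theorem pv_init_le_foldl_max (l : List Nat) (a : Nat) : a ≤ l.foldl max a := by
  induction l generalizing a with
  | nil => simp
  | cons x xs ih => exact le_trans (Nat.le_max_left a x) (ih _)

theorem pv_le_foldl_max (l : List Nat) (a : Nat) : ∀ x ∈ l, x ≤ l.foldl max a := by
  induction l generalizing a with
  | nil => simp
  | cons y ys ih =>
    intro x hx
    rcases List.mem_cons.mp hx with rfl | h
    · exact le_trans (Nat.le_max_right a _) (pv_init_le_foldl_max ys _)
    · exact ih _ x h

theorem pv_foldl_max_le (l : List Nat) (a k : Nat) (ha : a ≤ k) (hl : ∀ x ∈ l, x ≤ k) :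
    l.foldl max a ≤ k := by
  induction l generalizing a with
  | nil => exact ha
  | cons x xs ih =>
    exact ih (max a x) (max_le ha (hl x List.mem_cons_self))
      (fun y hy => hl y (List.mem_cons_of_mem _ hy))

theorem pv_maxA_eq (grids : List (List (List (String × Int)))) :
    pvMaxLenA grids = pvMaxLenB grids := by
  unfold pvMaxLenA pvMaxLenB
  generalize (0 : Nat) = a
  induction grids generalizing a with
  | nil => rfl
  | cons g gs ih => simpa using ih (max a g.length)

theorem pv_len_le_max (grids : List (List (List (String × Int))))
    (g : List (List (String × Int))) (hg : g ∈ grids) : g.length ≤ pvMaxLenB grids :=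
  pv_le_foldl_max _ 0 _ (List.mem_map_of_mem hg)

theorem pv_set_append {α : Type} (l1 l2 : List α) (a b : α) :
    (l1 ++ a :: l2).set l1.length b = l1 ++ b :: l2 := by
  induction l1 with
  | nil => rfl
  | cons x xs ih => simp only [List.cons_append, List.length_cons, List.set_cons_succ, ih]

theorem pv_sum_pos_iff (nf : List Bool) :
    (0 < ((nf.map (fun b => if b then (1 : Int) else 0)).sum)) ↔ true ∈ nf := by
  induction nf with
  | nil => simp
  | cons b bs ih =>
    cases b with
    | false => simpa using ih
    | true =>
      simp only [List.map_cons, List.sum_cons, if_true]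
      have h0 : (0 : Int) ≤ (bs.map (fun b => if b then (1 : Int) else 0)).sum := by
        apply List.sum_nonneg
        intro x hx
        rcases List.mem_map.mp hx with ⟨c, _, rfl⟩
        split <;> norm_num
      constructor
      · intro _; exact List.mem_cons_self
      · intro _; omega

-- the inner for loop of A: processes `rest` (indices starting at s = nfpre.length),
-- appending grid[idx] for live grids and clearing the flag of exhausted ones
theorem pv_inner_fold (idx : Nat) :
    ∀ (rest : List (List (List (String × Int)))) (mixed : List (List (String × Int)))
      (nfpre : List Bool),
    (PySem.List.enumerate rest (nfpre.length : Int)).foldl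
        (fun (st : List (List (String × Int)) × List Bool) (p : Int × List (List (String × Int))) =>
          if idx < p.2.length then (st.1 ++ [p.2.getD idx []], st.2)
          else (st.1, st.2.set p.1.toNat false))
        (mixed, nfpre ++ rest.map (fun g => decide (idx ≤ g.length)))
      = (mixed ++ rest.filterMap (fun g => g[idx]?),
         nfpre ++ rest.map (fun g => decide (idx < g.length))) := by
  intro rest
  induction rest with
  | nil => intro mixed nfpre; simp [PySem.List.enumerate_nil]
  | cons g gs ih =>
    intro mixed nfpre
    rw [PySem.List.enumerate_cons, List.foldl_cons]
    by_cases h : idx < g.length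
    · have hget : g[idx]? = some (g.getD idx []) := by
        simp [List.getD_eq_getElem?_getD, List.getElem?_eq_getElem h]
      have htrue : decide (idx ≤ g.length) = true := by simp; omega
      have htrue' : decide (idx < g.length) = true := by simpa using h
      simp only [if_pos h]
      have := ih (mixed ++ [g.getD idx []]) (nfpre ++ [decide (idx ≤ g.length)])
      simp only [List.length_append, List.length_singleton] at this
      have hcast : ((nfpre.length : Int) + 1) = ((nfpre.length + 1 : Nat) : Int) := by push_cast; ring
      rw [List.map_cons, htrue]
      rw [show nfpre ++ true :: gs.map (fun g => decide (idx ≤ g.length))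
            = (nfpre ++ [true]) ++ gs.map (fun g => decide (idx ≤ g.length)) by simp]
      rw [hcast]
      rw [show nfpre ++ [true] = nfpre ++ [decide (idx ≤ g.length)] by rw [htrue]]
      rw [this]
      rw [show List.filterMap (fun g => g[idx]?) (g :: gs)
            = g.getD idx [] :: List.filterMap (fun g => g[idx]?) gs by
          rw [List.filterMap_cons, hget]]
      rw [List.map_cons, htrue']
      simp [List.append_assoc]
      omega
    · have hget : g[idx]? = none := by
        exact List.getElem?_eq_none (by omega)
      have hfalse : decide (idx < g.length) = false := by simpa using h
      simp only [if_neg h, List.map_cons]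
      have hset : (nfpre ++ decide (idx ≤ g.length) :: gs.map (fun g => decide (idx ≤ g.length))).set
            ((nfpre.length : Int)).toNat false
          = nfpre ++ false :: gs.map (fun g => decide (idx ≤ g.length)) := by
        rw [Int.toNat_natCast, pv_set_append]
      rw [hset]
      have := ih mixed (nfpre ++ [false])
      simp only [List.length_append, List.length_singleton] at this
      have hcast : ((nfpre.length : Int) + 1) = ((nfpre.length + 1 : Nat) : Int) := by push_cast; ring
      rw [show nfpre ++ false :: gs.map (fun g => decide (idx ≤ g.length))
            = (nfpre ++ [false]) ++ gs.map (fun g => decide (idx ≤ g.length)) by simp]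
      rw [hcast, this]
      simp [hget, hfalse]

theorem pv_loopA_eq (grids : List (List (List (String × Int)))) :
    ∀ (fuel idx : Nat) (mixed : List (List (String × Int))),
    pvMaxLenB grids + 2 ≤ fuel + idx →
    pvLoopA grids fuel mixed (grids.map (fun g => decide (idx ≤ g.length))) idx
      = mixed ++ (List.range' idx (pvMaxLenB grids + 1 - idx)).flatMap
          (fun i => grids.filterMap (fun g => g[i]?)) := by
  intro fuel
  induction fuel with
  | zero =>
    intro idx mixed h
    have : pvMaxLenB grids + 1 - idx = 0 := by omega
    simp [pvLoopA, this]
  | succ fuel ih =>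
    intro idx mixed h
    rw [pvLoopA]
    by_cases hc : 0 < (((grids.map (fun g => decide (idx ≤ g.length))).map
        (fun b => if b then (1 : Int) else 0)).sum)
    · rw [if_pos hc]
      have hex : ∃ g ∈ grids, idx ≤ g.length := by
        have := (pv_sum_pos_iff _).mp hc
        rcases List.mem_map.mp this with ⟨g, hg, hgd⟩
        exact ⟨g, hg, by simpa using hgd.symm⟩
      rcases hex with ⟨g, hg, hgl⟩
      have hidx : idx ≤ pvMaxLenB grids := le_trans hgl (pv_len_le_max grids g hg)
      have hfold := pv_inner_fold idx grids mixed ([] : List Bool)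
      simp only [List.nil_append, List.length_nil, Nat.cast_zero] at hfold
      rw [hfold]
      have hmap : grids.map (fun g => decide (idx < g.length))
          = grids.map (fun g => decide (idx + 1 ≤ g.length)) := by
        apply List.map_congr_left; intro x _; rfl
      rw [hmap]
      rw [ih (idx + 1) _ (by omega)]
      have hcnt : pvMaxLenB grids + 1 - idx = (pvMaxLenB grids + 1 - (idx + 1)) + 1 := by omega
      rw [hcnt, List.range'_succ, List.flatMap_cons]
      simp
    · rw [if_neg hc]
      have hall : ∀ g ∈ grids, g.length < idx := by
        intro g hg
        by_contra hlt
        apply hc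
        apply (pv_sum_pos_iff _).mpr
        exact List.mem_map.mpr ⟨g, hg, by simp; omega⟩
      have : (List.range' idx (pvMaxLenB grids + 1 - idx)).flatMap
          (fun i => grids.filterMap (fun g => g[i]?)) = [] := by
        apply List.flatMap_eq_nil_iff.mpr
        intro i hi
        have hge : idx ≤ i := (List.mem_range'_1.mp hi).1
        apply List.filterMap_eq_nil_iff.mpr
        intro g hg
        exact List.getElem?_eq_none (by have := hall g hg; omega)
      rw [this, List.append_nil]

-- characterisation of A's result
theorem pv_A_flat (grids : List (List (List (String × Int)))) :
    mix_param_grids grids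
      = (List.range (pvMaxLenB grids)).flatMap (fun i => grids.filterMap (fun g => g[i]?)) := by
  unfold mix_param_grids
  have hrep : List.replicate grids.length true
      = grids.map (fun g => decide ((0 : Nat) ≤ g.length)) := by
    simp [List.map_const']
  rw [pv_maxA_eq, hrep, pv_loopA_eq grids (pvMaxLenB grids + 2) 0 [] (by omega)]
  rw [List.nil_append, Nat.sub_zero, ← List.range_eq_range', List.range_succ,
    List.flatMap_append, List.flatMap_singleton]
  have : grids.filterMap (fun g => g[pvMaxLenB grids]?) = [] := by
    apply List.filterMap_eq_nil_iff.mpr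
    intro g hg
    exact List.getElem?_eq_none (pv_len_le_max grids g hg)
  rw [this, List.append_nil]

-- B-side lemmas ------------------------------------------------------------

theorem pv_popfold (stks : List (List (List (String × Int)))) :
    ∀ mixed, stks.foldl (fun m s => m ++ [s.getLastD []]) mixed
      = mixed ++ stks.map (fun s => s.getLastD []) := by
  induction stks with
  | nil => simp
  | cons s ss ih =>
    intro mixed
    rw [List.foldl_cons, ih, List.map_cons]
    simp

-- popping a nonempty reversed remainder yields grid[idx]
theorem pv_pop_get (x : List (List (String × Int))) (idx : Nat) (hx : idx < x.length) :
    x[idx]? = some ((x.drop idx).reverse.getLastD []) := by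
  rw [List.getLastD_eq_getLast?, List.getLast?_reverse, ← List.head?_drop]
  cases hdrop : x.drop idx with
  | nil =>
    exact absurd hdrop (by simp [List.drop_eq_nil_iff]; omega)
  | cons a l => simp

theorem pv_rev_dropLast {α : Type} (m : List α) : m.reverse.dropLast = m.tail.reverse := by
  cases m with
  | nil => rfl
  | cons a t => simp

theorem pv_dropLast_rev (l : List (List (String × Int))) (n : Nat) :
    (l.drop n).reverse.dropLast = (l.drop (n + 1)).reverse := by
  rw [pv_rev_dropLast, List.tail_drop]

-- the round's pops are exactly grid[idx] of the live grids
theorem pv_pops (idx : Nat) (grids : List (List (List (String × Int)))) :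
    (grids.filter (fun g => decide (idx < g.length))).map
        (fun g => (g.drop idx).reverse.getLastD [])
      = grids.filterMap (fun g => g[idx]?) := by
  induction grids with
  | nil => rfl
  | cons x xs ih =>
    by_cases hx : idx < x.length
    · rw [List.filter_cons_of_pos (by simpa using hx), List.map_cons, List.filterMap_cons,
        pv_pop_get x idx hx, ih]
    · rw [List.filter_cons_of_neg (by simpa using hx), List.filterMap_cons,
        List.getElem?_eq_none (by omega), ih]

-- the surviving stacks are the reversed remainders at idx + 1
theorem pv_stks (idx : Nat) (grids : List (List (List (String × Int)))) :
    (((grids.filter (fun g => decide (idx < g.length))).map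
          (fun g => (g.drop idx).reverse)).map List.dropLast).filter (fun s => !s.isEmpty)
      = (grids.filter (fun g => decide (idx + 1 < g.length))).map
          (fun g => (g.drop (idx + 1)).reverse) := by
  induction grids with
  | nil => rfl
  | cons x xs ih =>
    by_cases h1 : idx + 1 < x.length
    · have h0 : idx < x.length := by omega
      have hne : ((x.drop (idx + 1)).reverse.isEmpty) = false := by
        simp [List.drop_eq_nil_iff]; omega
      rw [List.filter_cons_of_pos (by simpa using h0), List.map_cons, List.map_cons,
        pv_dropLast_rev, List.filter_cons_of_pos (by simp [hne]),
        List.filter_cons_of_pos (by simpa using h1), List.map_cons, ih]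
    · by_cases h0 : idx < x.length
      · have hnil : (x.drop (idx + 1)).reverse = [] := by
          simp [List.drop_eq_nil_iff]; omega
        rw [List.filter_cons_of_pos (by simpa using h0), List.map_cons, List.map_cons,
          pv_dropLast_rev, List.filter_cons_of_neg (by simp [hnil]),
          List.filter_cons_of_neg (by simpa using h1), ih]
      · rw [List.filter_cons_of_neg (by simpa using h0),
          List.filter_cons_of_neg (by simpa using h1), ih]

-- the stacks at round idx are the reversed remainders of the grids still longer than idx
theorem pv_loopB_eq (grids : List (List (List (String × Int)))) :
    ∀ (fuel idx : Nat) (mixed : List (List (String × Int))),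
    pvMaxLenB grids ≤ fuel + idx →
    pvLoopB fuel mixed
        ((grids.filter (fun g => decide (idx < g.length))).map (fun g => (g.drop idx).reverse))
      = mixed ++ (List.range' idx (pvMaxLenB grids - idx)).flatMap
          (fun i => grids.filterMap (fun g => g[i]?)) := by
  intro fuel
  induction fuel with
  | zero =>
    intro idx mixed h
    have : pvMaxLenB grids - idx = 0 := by omega
    simp [pvLoopB, this]
  | succ fuel ih =>
    intro idx mixed h
    rw [pvLoopB]
    by_cases hlt : idx < pvMaxLenB grids
    · -- some grid is still live: the stack list is nonempty
      have hex : ∃ g ∈ grids, idx < g.length := by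
        by_contra hno
        push_neg at hno
        have : pvMaxLenB grids ≤ idx := by
          apply pv_foldl_max_le _ _ _ (by omega)
          intro x hx
          rcases List.mem_map.mp hx with ⟨g, hg, rfl⟩
          exact hno g hg
        omega
      rcases hex with ⟨g, hg, hgl⟩
      have hne : ¬ ((grids.filter (fun g => decide (idx < g.length))).map
          (fun g => (g.drop idx).reverse)).isEmpty = true := by
        simp only [List.isEmpty_iff, List.map_eq_nil_iff, List.filter_eq_nil_iff]
        intro hall
        exact absurd hgl (by simpa using hall g hg)
      rw [if_neg hne, pv_popfold, List.map_map]
      have hcomp : ((fun (s : List (List (String × Int))) => s.getLastD ([] : List (String × Int))) ∘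
            (fun (g : List (List (String × Int))) => (g.drop idx).reverse))
          = fun (g : List (List (String × Int))) => (g.drop idx).reverse.getLastD [] := rfl
      rw [hcomp, pv_pops, pv_stks, ih (idx + 1) _ (by omega)]
      have hcnt : pvMaxLenB grids - idx = (pvMaxLenB grids - (idx + 1)) + 1 := by omega
      rw [hcnt, List.range'_succ, List.flatMap_cons]
      simp
    · -- every grid is exhausted: the stack list is empty and the remaining range is empty
      have hfil : grids.filter (fun g => decide (idx < g.length)) = [] := by
        apply List.filter_eq_nil_iff.mpr
        intro g hg
        have := pv_len_le_max grids g hg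
        simp; omega
      have : pvMaxLenB grids - idx = 0 := by omega
      simp [hfil, this]

theorem pv_B_flat (grids : List (List (List (String × Int)))) :
    mix_param_grids_alt grids
      = (List.range (pvMaxLenB grids)).flatMap (fun i => grids.filterMap (fun g => g[i]?)) := by
  unfold mix_param_grids_alt
  have hinit : (grids.filter (fun g => !g.isEmpty)).map List.reverse
      = (grids.filter (fun g => decide ((0 : Nat) < g.length))).map
          (fun g => (g.drop 0).reverse) := by
    simp only [List.drop_zero]
    congr 1
    apply List.filter_congr
    intro g _
    cases g <;> simp
  rw [hinit, pv_loopB_eq grids (pvMaxLenB grids + 1) 0 [] (by omega)]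
  rw [List.nil_append, Nat.sub_zero, List.range_eq_range']

-- ===== VERDICT (by name: the statement is the Claim_ definition above) =====
theorem mix_param_grids_spec : Claim_equal_mix_param_grids := by
  intro grids _
  unfold Spec_mix_param_grids
  rw [pv_A_flat, pv_B_flat]
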